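-- pv_equiv track=rewrite | github.com/adithyanandi1426/python_for_data_science | coding_challenges/fav_singer.py | count_favorite_singers
-- ===== SOURCE A (Python) =====
-- from collections import defaultdict
--
-- def count_favorite_singers(num_songs, singers):
--     singer_count = defaultdict(int)
--     max_count = 0
--
--     # Count occurrences of each singer
--     for singer in singers:
--         singer_count[singer] += 1
--         max_count = max(max_count, singer_count[singer])
--
--     # Count how many singers have the maximum count
--     favorite_singers_count = sum(1 for count in singer_count.values() if count == max_count)
--
--     return favorite_singers_count
-- ===== SOURCE B (Python) =====
-- def count_favorite_singers(num_songs, singers):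
--     ordered = sorted(singers)
--     n = len(ordered)
--     best = 0
--     ties = 0
--     i = 0
--     while i < n:
--         j = i + 1
--         while j < n and ordered[j] == ordered[i]:
--             j += 1
--         run = j - i
--         if run > best:
--             best, ties = run, 1
--         elif run == best:
--             ties += 1
--         i = j
--     return ties
-- ===== Notes on version B (the rewrite author's own statement) =====
-- stated objective: alternative
-- what changed: Replaces A's dict-counting pass with a threaded running max by sorting the list and doing a run-length scan over the sorted list: equal singers become contiguous runs, and best run length plus tie count are updated per run.
import Mathlib
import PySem

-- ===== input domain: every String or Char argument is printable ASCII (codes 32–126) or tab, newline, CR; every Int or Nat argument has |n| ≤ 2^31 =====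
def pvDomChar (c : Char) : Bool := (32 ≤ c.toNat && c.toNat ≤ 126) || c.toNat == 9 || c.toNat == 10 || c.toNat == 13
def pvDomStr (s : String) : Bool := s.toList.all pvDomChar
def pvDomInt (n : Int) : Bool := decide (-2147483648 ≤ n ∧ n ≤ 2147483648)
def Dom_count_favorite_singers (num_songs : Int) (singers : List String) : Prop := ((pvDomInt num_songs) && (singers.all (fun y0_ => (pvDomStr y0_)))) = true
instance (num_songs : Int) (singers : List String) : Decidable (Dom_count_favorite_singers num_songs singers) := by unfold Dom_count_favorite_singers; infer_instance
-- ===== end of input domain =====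

-- B replaces A's dict-counting loop (which threads a running max) by sorting the
-- list and scanning the contiguous runs of equal singers (alternative algorithm).

-- ===== PORT A =====
-- the body of A's for-loop: increment the singer's tally, update the running max
def pvStepA (st : PySem.Dict String Int × Int) (singer : String) : PySem.Dict String Int × Int :=
  let c := st.1.getD singer 0 + 1
  (st.1.insert singer c, max st.2 c)

def count_favorite_singers (num_songs : Int) (singers : List String) : Int :=
  let r := singers.foldl pvStepA (PySem.Dict.empty, 0)
  ((r.1.values).map (fun count => if count == r.2 then (1 : Int) else 0)).sum

-- ===== PORT B =====
-- inner while of B: advance j past the elements equal to ordered[i]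
def pvInnerB (ordered : List String) (i : Nat) (j : Nat) : Nat :=
  if h : j < ordered.length ∧ (ordered.getD j "" == ordered.getD i "") = true then
    pvInnerB ordered i (j + 1)
  else j
termination_by ordered.length - j
decreasing_by
  obtain ⟨h1, -⟩ := h
  omega

-- termination fact the outer loop cites: the inner while never moves j backwards
theorem pv_le_innerB (ordered : List String) (i : Nat) :
    ∀ (n j : Nat), ordered.length - j ≤ n → j ≤ pvInnerB ordered i j := by
  intro n
  induction n with
  | zero =>
    intro j h
    rw [pvInnerB, dif_neg (fun hc => absurd hc.1 (by omega))]
  | succ n ih =>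
    intro j h
    rw [pvInnerB]
    split
    · next hc => exact le_trans (Nat.le_succ j) (ih (j + 1) (by omega))
    · exact le_refl j

-- outer while of B: i walks from run start to run start over the sorted list
def pvOuterB (ordered : List String) (best ties : Int) (i : Nat) : Int :=
  if i < ordered.length then
    let j := pvInnerB ordered i (i + 1)
    let run : Int := (j : Int) - (i : Int)
    let st := if run > best then (run, (1 : Int))
              else if run == best then (best, ties + 1) else (best, ties)
    pvOuterB ordered st.1 st.2 j
  else ties
termination_by ordered.length - i
decreasing_by
  have := pv_le_innerB ordered i ordered.length (i + 1) (by omega)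
  omega

def count_favorite_singers_alt (num_songs : Int) (singers : List String) : Int :=
  pvOuterB (PySem.List.sorted singers (fun s => s) false) 0 0 0

-- ===== PRECONDITION & SPEC =====
def Spec_count_favorite_singers (num_songs : Int) (singers : List String) (out : Int) : Prop := out = count_favorite_singers_alt num_songs singers
instance (num_songs : Int) (singers : List String) (out : Int) : Decidable (Spec_count_favorite_singers num_songs singers out) := by unfold Spec_count_favorite_singers; infer_instance

-- ===== CLAIM (what is proved, stated in full; the proofs are below) =====
def Claim_equal_count_favorite_singers : Prop := ∀ (num_songs : Int) (singers : List String), Dom_count_favorite_singers num_songs singers → Spec_count_favorite_singers num_songs singers (count_favorite_singers num_songs singers)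

-- ===== LEMMAS AND PROOFS =====

-- B's outer while-loop over the sorted remainder (the list form of B's index scan,
-- used only by the proofs): run = 1 + length of the equal prefix of the tail
def pvScanB : List String → Int → Int → Int
  | [], _, ties => ties
  | x :: t, best, ties =>
    let run : Int := 1 + ((t.takeWhile (fun y => y == x)).length : Nat)
    let st := if run > best then (run, (1 : Int))
              else if run == best then (best, ties + 1) else (best, ties)
    pvScanB (t.dropWhile (fun y => y == x)) st.1 st.2
termination_by ys best ties => ys.length
decreasing_by
  simpa using Nat.lt_succ_of_le (t.length_dropWhile_le (fun y => y == x))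

-- the per-key counts list both sides' results are ultimately about
def pvCts (xs : List String) : List Int :=
  (PySem.Set.ofList xs).map (fun k => ((List.count k xs : Nat) : Int))

-- running max with floor 0
def pvMz (vs : List Int) : Int := vs.foldl max 0

-- pushing the Nat-side 0/1 if of a countP out of the cast
theorem pv_cast_if (c : Nat) (u v : Int) :
    ((c + if (u == v) then 1 else 0 : Nat) : Int) = (c : Int) + (if u = v then 1 else 0) := by
  by_cases h : u = v <;> simp [h]

-- B's best/ties update as a step function on (best, ties)
def pvStep (st : Int × Int) (r : Int) : Int × Int :=
  if r > st.1 then (r, 1) else if r == st.1 then (st.1, st.2 + 1) else st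

theorem pvMz_nonneg (vs : List Int) : 0 ≤ pvMz vs :=
  (PySem.List.le_foldl_max vs 0).1

theorem pv_le_mz {v : Int} {vs : List Int} (h : v ∈ vs) : v ≤ pvMz vs :=
  (PySem.List.le_foldl_max vs 0).2 v h

theorem pv_mem_cts {v : Int} {xs : List String} :
    v ∈ pvCts xs ↔ ∃ k ∈ xs, v = ((List.count k xs : Nat) : Int) := by
  simp only [pvCts, List.mem_map, PySem.Set.mem_ofList]
  constructor
  · rintro ⟨k, hk, rfl⟩; exact ⟨k, hk, rfl⟩
  · rintro ⟨k, hk, rfl⟩; exact ⟨k, hk, rfl⟩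

theorem pvMz_perm {vs ws : List Int} (h : vs.Perm ws) : pvMz vs = pvMz ws := by
  have aux : ∀ {a b : List Int}, a.Perm b → pvMz a ≤ pvMz b := by
    intro a b hab
    rcases PySem.List.foldl_max_mem a 0 with h0 | hmem
    · rw [pvMz, h0]; exact pvMz_nonneg b
    · exact pv_le_mz (hab.mem_iff.mp hmem)
  exact le_antisymm (aux h) (aux h.symm)

-- the first component of A's loop state is the plain counter-building fold
theorem pvFst_fold (xs : List String) :
    ∀ (d : PySem.Dict String Int) (m : Int),
      (xs.foldl pvStepA (d, m)).1 = xs.foldl (fun d x => d.insert x (d.getD x 0 + 1)) d := by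
  induction xs with
  | nil => intro d m; rfl
  | cons x t ih => intro d m; simpa [pvStepA] using ih _ _

-- appending one singer x: the new max of counts is max(old max, new count of x)
theorem pvMz_cts_append (xs : List String) (x : String) :
    pvMz (pvCts (xs ++ [x])) = max (pvMz (pvCts xs)) ((List.count x xs : Nat) + 1 : Int) := by
  have hx : ((List.count x (xs ++ [x]) : Nat) : Int) = ((List.count x xs : Nat) + 1 : Int) := by
    simp [List.count_append]
  apply le_antisymm
  · rcases PySem.List.foldl_max_mem (pvCts (xs ++ [x])) 0 with h0 | hmem
    · rw [pvMz, h0]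
      exact le_trans (pvMz_nonneg (pvCts xs)) (le_max_left _ _)
    · rcases pv_mem_cts.mp hmem with ⟨k, hk, hke⟩
      rw [show pvMz (pvCts (xs ++ [x])) = ((List.count k (xs ++ [x]) : Nat) : Int) from hke]
      by_cases hkx : k = x
      · subst hkx; rw [hx]; exact le_max_right _ _
      · have hkxs : k ∈ xs := by
          rcases List.mem_append.mp hk with h | h
          · exact h
          · simp at h; exact absurd h hkx
        have hc : List.count k (xs ++ [x]) = List.count k xs := by
          simp [List.count_append, List.count_singleton]
          exact fun h => absurd h.symm hkx
        rw [hc]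
        exact le_trans (pv_le_mz (pv_mem_cts.mpr ⟨k, hkxs, rfl⟩)) (le_max_left _ _)
  · apply max_le
    · rcases PySem.List.foldl_max_mem (pvCts xs) 0 with h0 | hmem
      · rw [pvMz, h0]; exact pvMz_nonneg _
      · rcases pv_mem_cts.mp hmem with ⟨k, hk, hke⟩
        rw [show pvMz (pvCts xs) = ((List.count k xs : Nat) : Int) from hke]
        have hle : ((List.count k xs : Nat) : Int) ≤ ((List.count k (xs ++ [x]) : Nat) : Int) := by
          simp [List.count_append]
        exact le_trans hle
          (pv_le_mz (pv_mem_cts.mpr ⟨k, List.mem_append.mpr (Or.inl hk), rfl⟩))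
    · rw [← hx]
      exact pv_le_mz (pv_mem_cts.mpr ⟨x, List.mem_append.mpr (Or.inr (by simp)), rfl⟩)

-- A's running max after the loop is the max (floor 0) of the singers' counts
theorem pvSnd_fold (xs : List String) :
    (xs.foldl pvStepA (PySem.Dict.empty, 0)).2 = pvMz (pvCts xs) := by
  induction xs using List.reverseRecOn with
  | nil => simp [pvCts, pvMz, PySem.Set.ofList]
  | append_singleton t x ih =>
    rw [List.foldl_append]
    have hfst : (t.foldl pvStepA (PySem.Dict.empty, 0)).1 = PySem.Dict.counter t := by
      rw [pvFst_fold, PySem.Dict.foldl_insert_getD_add_one_eq_counter]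
    show max (t.foldl pvStepA (PySem.Dict.empty, 0)).2
        ((t.foldl pvStepA (PySem.Dict.empty, 0)).1.getD x 0 + 1) = _
    rw [hfst, PySem.Dict.getD_counter, ih, pvMz_cts_append]

-- everything after the leading run of x in a sorted tail is strictly above x
theorem pv_lt_dropWhile (x : String) : ∀ (t : List String),
    t.Pairwise (· ≤ ·) → (∀ y ∈ t, x ≤ y) →
    ∀ z ∈ t.dropWhile (fun y => y == x), x < z := by
  intro t
  induction t with
  | nil => simp
  | cons y t ih =>
    intro hp hle z hz
    by_cases hy : (y == x) = true
    · rw [List.dropWhile_cons, if_pos hy] at hz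
      exact ih hp.tail (fun w hw => hle w (List.mem_cons_of_mem _ hw)) z hz
    · rw [List.dropWhile_cons, if_neg hy] at hz
      have hyx : y ≠ x := by simpa using hy
      have hxy : x < y := lt_of_le_of_ne (hle y List.mem_cons_self) (fun h => hyx h.symm)
      rcases List.mem_cons.mp hz with rfl | hz
      · exact hxy
      · exact lt_of_lt_of_le hxy ((List.pairwise_cons.mp hp).1 z hz)

-- Set.add-folding past a fresh head element commutes with cons
theorem pv_foldl_add_cons (x : String) : ∀ (d s : List String), x ∉ d →
    List.foldl PySem.Set.add (x :: s) d = x :: List.foldl PySem.Set.add s d := by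
  intro d
  induction d with
  | nil => intro s _; rfl
  | cons y d ih =>
    intro s h
    have hyx : y ≠ x := by rintro rfl; exact h List.mem_cons_self
    have hstep : PySem.Set.add (x :: s) y = x :: PySem.Set.add s y := by
      by_cases hc : y ∈ s <;> simp [PySem.Set.add, hyx, hc]
    simp only [List.foldl_cons, hstep]
    exact ih _ (fun hm => h (List.mem_cons_of_mem _ hm))

-- Set.add-folding a run of copies of x into a set containing x is a no-op
theorem pv_foldl_add_const (x : String) : ∀ (w s : List String),
    (∀ y ∈ w, y = x) → x ∈ s → List.foldl PySem.Set.add s w = s := by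
  intro w
  induction w with
  | nil => intro s _ _; rfl
  | cons y w ih =>
    intro s hw hx
    have hy : y = x := hw y List.mem_cons_self
    subst hy
    have : PySem.Set.add s y = s := by
      simp [PySem.Set.add, hx]
    simp only [List.foldl_cons, this]
    exact ih s (fun z hz => hw z (List.mem_cons_of_mem _ hz)) hx

-- sorted head group: the counts list of x :: t splits off x's full count
theorem pv_cts_cons (x : String) (t : List String)
    (hp : (x :: t).Pairwise (· ≤ ·)) :
    pvCts (x :: t)
      = ((List.count x (x :: t) : Nat) : Int) :: pvCts (t.dropWhile (fun y => y == x)) ∧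
      ((List.count x (x :: t) : Nat) : Int)
        = 1 + ((t.takeWhile (fun y => y == x)).length : Nat) := by
  have hle : ∀ y ∈ t, x ≤ y := fun y hy => (List.pairwise_cons.mp hp).1 y hy
  have hpt : t.Pairwise (· ≤ ·) := (List.pairwise_cons.mp hp).2
  have hw : ∀ y ∈ t.takeWhile (fun y => y == x), y = x := by
    intro y hy
    simpa using List.mem_takeWhile_imp hy
  have hd := pv_lt_dropWhile x t hpt hle
  have hxd : x ∉ t.dropWhile (fun y => y == x) := fun hm => absurd (hd x hm) (lt_irrefl x)
  have hct : List.count x t = (t.takeWhile (fun y => y == x)).length := by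
    conv_lhs => rw [← List.takeWhile_append_dropWhile (p := fun y => y == x) (l := t)]
    rw [List.count_append, List.count_eq_length.mpr (fun b hb => (hw b hb).symm),
      List.count_eq_zero.mpr hxd]
    omega
  have hof : PySem.Set.ofList (x :: t)
      = x :: PySem.Set.ofList (t.dropWhile (fun y => y == x)) := by
    show List.foldl PySem.Set.add PySem.Set.empty (x :: t) = _
    rw [List.foldl_cons]
    have h0 : PySem.Set.add PySem.Set.empty x = [x] := rfl
    rw [h0]
    conv_lhs => rw [← List.takeWhile_append_dropWhile (p := fun y => y == x) (l := t)]
    rw [List.foldl_append, pv_foldl_add_const x _ [x] hw (List.mem_singleton.mpr rfl)]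
    exact pv_foldl_add_cons x _ [] hxd
  constructor
  · rw [pvCts, hof, List.map_cons]
    congr 1
    apply List.map_congr_left
    intro k hk
    have hkd : k ∈ t.dropWhile (fun y => y == x) := (PySem.Set.mem_ofList _ _).mp hk
    have hxk : x < k := hd k hkd
    have hkx : k ≠ x := ne_of_gt hxk
    have hkw : k ∉ t.takeWhile (fun y => y == x) := fun hm => hkx (hw k hm)
    have : List.count k (x :: t) = List.count k (t.dropWhile (fun y => y == x)) := by
      have h1 : List.count k (x :: t) = List.count k t := by
        simp [List.count_cons, hkx, Ne.symm hkx]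
      rw [h1]
      conv_lhs => rw [← List.takeWhile_append_dropWhile (p := fun y => y == x) (l := t)]
      rw [List.count_append, List.count_eq_zero.mpr hkw]
      omega
    exact_mod_cast congrArg (fun n : Nat => (n : Int)) this
  · rw [List.count_cons_self, hct]
    push_cast
    ring

-- folding pvStep: first component is the running max, second adds on the max's hit count
theorem pv_foldl_step (L : List Int) : ∀ (b t : Int),
    L.foldl pvStep (b, t)
      = (L.foldl max b,
         (if L.foldl max b = b then t else 0) + ((L.countP (· == L.foldl max b) : Nat) : Int)) := by
  induction L with
  | nil => intro b t; simp
  | cons x L ih =>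
    intro b t
    rcases lt_trichotomy b x with h1 | h2 | h3
    · have hstep : pvStep (b, t) x = (x, 1) := by simp [pvStep, h1]
      have hmax : max b x = x := max_eq_right h1.le
      simp only [List.foldl_cons, hstep, hmax]
      rw [ih x 1]
      have hxle : x ≤ L.foldl max x := (PySem.List.le_foldl_max L x).1
      have hMb : ¬ L.foldl max x = b := by omega
      rw [if_neg hMb, List.countP_cons]
      refine congrArg (Prod.mk _) ?_
      rw [pv_cast_if]
      split_ifs <;> omega
    · subst h2
      have hstep : pvStep (b, t) b = (b, t + 1) := by simp [pvStep]
      simp only [List.foldl_cons, hstep, max_self]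
      rw [ih b (t + 1), List.countP_cons]
      refine congrArg (Prod.mk _) ?_
      rw [pv_cast_if]
      split_ifs <;> omega
    · have hstep : pvStep (b, t) x = (b, t) := by
        simp [pvStep, not_lt.mpr h3.le, ne_of_lt h3]
      have hmax : max b x = b := max_eq_left h3.le
      simp only [List.foldl_cons, hstep, hmax]
      rw [ih b t, List.countP_cons]
      refine congrArg (Prod.mk _) ?_
      have hble : b ≤ L.foldl max b := (PySem.List.le_foldl_max L b).1
      have hxM : ¬ (x = L.foldl max b) := by omega
      rw [pv_cast_if]
      split_ifs <;> omega

-- B's scan over a sorted list is the pvStep-fold over its counts list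
theorem pvScanB_fold : ∀ (n : Nat) (ys : List String), ys.length ≤ n →
    ys.Pairwise (· ≤ ·) → ∀ b t : Int,
    pvScanB ys b t = ((pvCts ys).foldl pvStep (b, t)).2 := by
  intro n
  induction n with
  | zero =>
    intro ys hlen _ b t
    have hnil : ys = [] := List.eq_nil_of_length_eq_zero (Nat.le_zero.mp hlen)
    subst hnil
    simp [pvScanB, pvCts, PySem.Set.ofList, PySem.Set.empty]
  | succ n ih =>
    intro ys hlen hp b tt
    match ys, hlen, hp with
    | [], _, _ => simp [pvScanB, pvCts, PySem.Set.ofList, PySem.Set.empty]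
    | x :: t, hlen, hp =>
      obtain ⟨hcts, hrun⟩ := pv_cts_cons x t hp
      have hdlen : (t.dropWhile (fun y => y == x)).length ≤ n := by
        have := t.length_dropWhile_le (fun y => y == x)
        have : t.length ≤ n := by simpa using Nat.succ_le_succ_iff.mp hlen
        omega
      have hdp : (t.dropWhile (fun y => y == x)).Pairwise (· ≤ ·) :=
        List.Pairwise.sublist (List.dropWhile_sublist _) ((List.pairwise_cons.mp hp).2)
      simp only [pvScanB]
      rw [hcts, List.foldl_cons, hrun]
      have hstep : (if (1 + ((t.takeWhile (fun y => y == x)).length : Nat) : Int) > b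
            then ((1 + ((t.takeWhile (fun y => y == x)).length : Nat) : Int), (1 : Int))
            else if (1 + ((t.takeWhile (fun y => y == x)).length : Nat) : Int) == b
              then (b, tt + 1) else (b, tt))
          = pvStep (b, tt) (1 + ((t.takeWhile (fun y => y == x)).length : Nat) : Int) := rfl
      rw [hstep, ih _ hdlen hdp]


-- dropping a scanned run: dropWhile is dropping the takeWhile's length
theorem pv_dropWhile_eq_drop (p : String → Bool) (l : List String) :
    l.dropWhile p = l.drop (l.takeWhile p).length := by
  induction l with
  | nil => rfl
  | cons x t ih => by_cases h : p x <;> simp [List.dropWhile_cons, List.takeWhile_cons, h, ih]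

-- the inner while lands right after the leading run of elements equal to ordered[i]
theorem pvInnerB_eq (ordered : List String) (i : Nat) : ∀ (n j : Nat), ordered.length - j ≤ n →
    pvInnerB ordered i j
      = j + ((ordered.drop j).takeWhile (fun y => y == ordered.getD i "")).length := by
  intro n
  induction n with
  | zero =>
    intro j h
    rw [pvInnerB, dif_neg (fun hc => absurd hc.1 (by omega))]
    rw [List.drop_eq_nil_of_le (by omega)]
    rfl
  | succ n ih =>
    intro j h
    rw [pvInnerB]
    by_cases hj : j < ordered.length
    · have hdrop : ordered.drop j = ordered[j] :: ordered.drop (j + 1) :=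
        List.drop_eq_getElem_cons hj
      have hgd : ordered.getD j "" = ordered[j] := List.getD_eq_getElem ordered "" hj
      by_cases heq : (ordered.getD j "" == ordered.getD i "") = true
      · rw [dif_pos ⟨hj, heq⟩, ih (j + 1) (by omega), hdrop, List.takeWhile_cons,
          if_pos (hgd ▸ heq)]
        simp only [List.length_cons]
        omega
      · rw [dif_neg (fun hc => heq hc.2), hdrop, List.takeWhile_cons,
          if_neg (fun hc => heq (hgd ▸ hc))]
        rfl
    · rw [dif_neg (fun hc => hj hc.1), List.drop_eq_nil_of_le (by omega)]
      rfl

-- B's index scan is the list-form scan of the remaining suffix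
theorem pvOuterB_eq (ordered : List String) : ∀ (n : Nat) (b t : Int) (i : Nat),
    ordered.length - i ≤ n →
    pvOuterB ordered b t i = pvScanB (ordered.drop i) b t := by
  intro n
  induction n with
  | zero =>
    intro b t i h
    rw [pvOuterB, if_neg (by omega), List.drop_eq_nil_of_le (by omega), pvScanB]
  | succ n ih =>
    intro b t i h
    by_cases hi : i < ordered.length
    · have hdrop : ordered.drop i = ordered[i] :: ordered.drop (i + 1) :=
        List.drop_eq_getElem_cons hi
      have hgd : ordered.getD i "" = ordered[i] := List.getD_eq_getElem ordered "" hi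
      have hinner := pvInnerB_eq ordered i ordered.length (i + 1) (by omega)
      set L := ((ordered.drop (i + 1)).takeWhile (fun y => y == ordered.getD i "")).length
        with hL
      have hjge := pv_le_innerB ordered i ordered.length (i + 1) (by omega)
      rw [pvOuterB, if_pos hi]
      simp only []
      rw [hdrop, pvScanB]
      have hrun : ((pvInnerB ordered i (i + 1) : Nat) : Int) - (i : Int)
          = 1 + ((ordered.drop (i + 1)).takeWhile (fun y => y == ordered[i])).length := by
        rw [hinner, ← hgd, ← hL]
        push_cast
        ring
      rw [hrun]
      have hdw : (ordered.drop (i + 1)).dropWhile (fun y => y == ordered[i])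
          = ordered.drop (pvInnerB ordered i (i + 1)) := by
        rw [pv_dropWhile_eq_drop, List.drop_drop, hinner, ← hgd, ← hL, Nat.add_comm]
      rw [hdw]
      exact ih _ _ (pvInnerB ordered i (i + 1)) (by omega)
    · rw [pvOuterB, if_neg hi, List.drop_eq_nil_of_le (by omega), pvScanB]

-- ===== VERDICT (by name: the statement is the Claim_ definition above) =====
theorem count_favorite_singers_spec : Claim_equal_count_favorite_singers := by
  intro ns S _
  show count_favorite_singers ns S = count_favorite_singers_alt ns S
  unfold count_favorite_singers count_favorite_singers_alt
  have hfst : (S.foldl pvStepA (PySem.Dict.empty, 0)).1 = PySem.Dict.counter S := by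
    rw [pvFst_fold, PySem.Dict.foldl_insert_getD_add_one_eq_counter]
  have hvals : (S.foldl pvStepA (PySem.Dict.empty, 0)).1.values = pvCts S := by
    rw [hfst]
    simp only [PySem.Dict.values, PySem.Dict.items_counter, List.map_map]
    rfl
  have hpw : (PySem.List.sorted S (fun s => s) false).Pairwise (· ≤ ·) :=
    PySem.List.sorted_pairwise S (fun s => s)
  have hperm : (PySem.List.sorted S (fun s => s) false).Perm S :=
    PySem.List.sorted_perm S _ false
  have hofperm : (PySem.Set.ofList (PySem.List.sorted S (fun s => s) false)).Perm
      (PySem.Set.ofList S) :=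
    (List.perm_ext_iff_of_nodup (PySem.Set.nodup_ofList _) (PySem.Set.nodup_ofList _)).mpr
      (fun a => by rw [PySem.Set.mem_ofList, PySem.Set.mem_ofList, hperm.mem_iff])
  have hctsperm : (pvCts (PySem.List.sorted S (fun s => s) false)).Perm (pvCts S) := by
    have hmapeq : pvCts (PySem.List.sorted S (fun s => s) false)
        = (PySem.Set.ofList (PySem.List.sorted S (fun s => s) false)).map
            (fun k => ((List.count k S : Nat) : Int)) := by
      unfold pvCts
      apply List.map_congr_left
      intro k _
      rw [hperm.count_eq]
    rw [hmapeq]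
    exact hofperm.map _
  have hB : pvScanB (PySem.List.sorted S (fun s => s) false) 0 0
      = ((pvCts (PySem.List.sorted S (fun s => s) false)).countP
          (· == pvMz (pvCts (PySem.List.sorted S (fun s => s) false))) : Nat) := by
    rw [pvScanB_fold _ _ le_rfl hpw 0 0, pv_foldl_step]
    simp [pvMz]
  show ((List.foldl pvStepA (PySem.Dict.empty, 0) S).1.values.map
      (fun count => if (count == (List.foldl pvStepA (PySem.Dict.empty, 0) S).2) then (1 : Int) else 0)).sum
    = pvOuterB (PySem.List.sorted S (fun s => s) false) 0 0 0
  rw [pvOuterB_eq _ (PySem.List.sorted S (fun s => s) false).length 0 0 0 (by omega),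
    List.drop_zero]
  rw [hvals, pvSnd_fold, PySem.List.sum_map_ite_one_zero, hB,
    pvMz_perm hctsperm, hctsperm.countP_eq]
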